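-- pv_equiv track=rewrite | github.com/Mouther201/final-eval | main.py | get_z_value
-- ===== SOURCE A (Python) =====
-- def get_char_value(char):
--     """
--     Calculates the value of a character. a=1, b=2, ..., z=26.
--     Non-alphabetic characters have a value of 0.
--     """
--     if 'a' <= char.lower() <= 'z':
--         return ord(char.lower()) - ord('a') + 1
--     return 0
--
-- def get_z_value(input_str, index):
--     """
--     Calculates the value of 'z' which takes the next character's value.
--     This is recursive if the next character is also 'z'.
--     """
--     # Base value of 'z'
--     value = get_char_value('z')
--     next_index = index + 1
--
--     # If there is a next character
--     if next_index < len(input_str):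
--         next_char = input_str[next_index]
--         if next_char.lower() == 'z':
--             # If next char is 'z', recurse
--             recursive_value, new_index = get_z_value(input_str, next_index)
--             value += recursive_value
--             return value, new_index
--         else:
--             # Otherwise, just add the next char's value
--             value += get_char_value(next_char)
--             return value, next_index + 1
--
--     # 'z' is the last character in the string
--     return value, next_index
-- ===== SOURCE B (Python) =====
-- def _char_value(ch):
--     n = ord(ch.lower())
--     return n - 96 if 97 <= n <= 122 else 0
--
-- def get_z_value(input_str, index):
--     n = len(input_str)
--     value = 26
--     next_index = index + 1
--     while next_index < n and input_str[next_index].lower() == 'z':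
--         value += 26
--         next_index += 1
--     if next_index < n:
--         return value + _char_value(input_str[next_index]), next_index + 1
--     return value, next_index
-- ===== Notes on version B (the rewrite author's own statement) =====
-- stated objective: alternative
-- what changed: Replaces A's non-tail recursion (each level adds 26 after the recursive call returns) by a single tail-recursive while loop that accumulates the value and final index directly.
-- outside the precondition, e.g. on get_z_value('abc', -10): A raises IndexError, B raises IndexError
import Mathlib
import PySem

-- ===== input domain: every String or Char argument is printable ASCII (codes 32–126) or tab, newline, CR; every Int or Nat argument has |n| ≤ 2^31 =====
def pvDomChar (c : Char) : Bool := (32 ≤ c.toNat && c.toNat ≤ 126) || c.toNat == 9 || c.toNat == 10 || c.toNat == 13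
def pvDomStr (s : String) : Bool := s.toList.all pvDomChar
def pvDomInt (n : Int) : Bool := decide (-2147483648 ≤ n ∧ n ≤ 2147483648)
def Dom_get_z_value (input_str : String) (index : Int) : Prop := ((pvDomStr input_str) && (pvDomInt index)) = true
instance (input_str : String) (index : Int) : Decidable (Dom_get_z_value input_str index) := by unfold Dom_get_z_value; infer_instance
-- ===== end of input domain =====

-- B replaces A's non-tail recursion by a tail-recursive while loop with an accumulator
-- (objective: alternative decomposition, same cost).

-- ===== PORT A =====
-- get_char_value: a=1 … z=26, 0 for non-alphabetic.
def pvCharValue (c : Char) : Int :=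
  let lc := PySem.Chars.lowerChar c
  if 'a' ≤ lc ∧ lc ≤ 'z' then (lc.toNat : Int) - ('a'.toNat : Int) + 1 else 0

-- A's recursion, on the code points of input_str; pyGet? = none is Python's
-- IndexError (excluded by Pre_), the port returns (value, ni) there.
def pvZRecA (cs : List Char) (index : Int) : Int × Int :=
  let value : Int := pvCharValue 'z'
  let ni : Int := index + 1
  if _h : ni < (cs.length : Int) then
    match PySem.List.pyGet? cs ni with
    | some c =>
      if PySem.Chars.lowerChar c = 'z' then
        let r := pvZRecA cs ni
        (value + r.1, r.2)
      else
        (value + pvCharValue c, ni + 1)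
    | none => (value, ni)
  else
    (value, ni)
termination_by ((cs.length : Int) - (index + 1)).toNat
decreasing_by omega

def get_z_value (input_str : String) (index : Int) : Int × Int :=
  pvZRecA input_str.toList index

-- ===== PORT B =====
-- B's char value helper: arithmetic on the code point, as in Source B.
def pvCharValueB (ch : Char) : Int :=
  let n : Int := ((PySem.Chars.lowerChar ch).toNat : Int)
  if 97 ≤ n ∧ n ≤ 122 then n - 96 else 0

-- B's while loop: accumulate 26 per consecutive 'z' after position next_index-1.
def pvZLoopB (cs : List Char) (value : Int) (next_index : Int) : Int × Int :=
  if h : next_index < (cs.length : Int) ∧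
      (PySem.List.pyGet? cs next_index).map PySem.Chars.lowerChar = some 'z' then
    pvZLoopB cs (value + 26) (next_index + 1)
  else
    if next_index < (cs.length : Int) then
      (value + (match PySem.List.pyGet? cs next_index with
                | some c => pvCharValueB c
                | none => 0), next_index + 1)
    else
      (value, next_index)
termination_by ((cs.length : Int) - next_index).toNat
decreasing_by omega

def get_z_value_alt (input_str : String) (index : Int) : Int × Int :=
  pvZLoopB input_str.toList 26 (index + 1)

-- ===== PRECONDITION & SPEC =====
-- Pre_ excludes exactly the inputs where Python A raises IndexError: index+1 in
-- range [-len, len) is required whenever index+1 < len (both programs index there).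
def Pre_get_z_value (input_str : String) (index : Int) : Prop :=
  index + 1 < (PySem.Str.len input_str : Int) → -(PySem.Str.len input_str : Int) ≤ index + 1
instance (input_str : String) (index : Int) : Decidable (Pre_get_z_value input_str index) := by
  unfold Pre_get_z_value; infer_instance

def pvWitness_get_z_value : String × Int := ("zza", 0)

def Spec_get_z_value (input_str : String) (index : Int) (out : Int × Int) : Prop := out = get_z_value_alt input_str index
instance (input_str : String) (index : Int) (out : Int × Int) : Decidable (Spec_get_z_value input_str index out) := by unfold Spec_get_z_value; infer_instance

-- ===== CLAIM (what is proved, stated in full; the proofs are below) =====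
def Claim_equal_get_z_value : Prop := ∀ (input_str : String) (index : Int), Dom_get_z_value input_str index → Pre_get_z_value input_str index → Spec_get_z_value input_str index (get_z_value input_str index)

-- ===== LEMMAS AND PROOFS =====

-- Char ≤ is UInt32 ≤ on code points
lemma pv_char_le_iff (a b : Char) : (a ≤ b) ↔ (a.toNat ≤ b.toNat) := Iff.rfl

-- the two char-value helpers agree
lemma pvCharValue_eq (c : Char) : pvCharValueB c = pvCharValue c := by
  have ha : 'a'.toNat = 97 := rfl
  have hz : 'z'.toNat = 122 := rfl
  simp only [pvCharValue, pvCharValueB, pv_char_le_iff, ha, hz]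
  split_ifs with h1 h2 h2 <;> push_cast <;> omega

lemma pvCharValue_z : pvCharValue 'z' = 26 := by decide

-- loop invariant: B's loop computes A's recursion value shifted by the accumulator
lemma pvZLoopB_eq (cs : List Char) (i : Int)
    (hlo : -(cs.length : Int) ≤ i + 1) :
    ∀ v : Int, pvZLoopB cs v (i + 1) = (v - 26 + (pvZRecA cs i).1, (pvZRecA cs i).2) := by
  by_cases hlt : i + 1 < (cs.length : Int)
  · obtain ⟨c, hc⟩ : ∃ c, PySem.List.pyGet? cs (i + 1) = some c := by
      cases hget : PySem.List.pyGet? cs (i + 1) with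
      | some c => exact ⟨c, rfl⟩
      | none =>
        rw [PySem.List.pyGet?_eq_none_iff] at hget
        exact absurd ⟨hlo, hlt⟩ hget
    by_cases hz : PySem.Chars.lowerChar c = 'z'
    · intro v
      have ih := pvZLoopB_eq cs (i + 1) (by omega)
      rw [pvZLoopB, dif_pos ⟨hlt, by rw [hc]; simp [hz]⟩, ih (v + 26)]
      conv_rhs => rw [pvZRecA]
      simp only [hlt, dif_pos, hc, hz, if_true, pvCharValue_z, Prod.mk.injEq]
      exact ⟨by ring, trivial⟩
    · intro v
      rw [pvZLoopB, dif_neg (by rw [hc]; simp [hz]), if_pos hlt]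
      conv_rhs => rw [pvZRecA]
      simp only [hlt, dif_pos, hc, if_neg hz, pvCharValue_z, pvCharValue_eq,
        Prod.mk.injEq]
      exact ⟨by ring, trivial⟩
  · intro v
    rw [pvZLoopB, pvZRecA, dif_neg (fun h => hlt h.1), if_neg hlt, dif_neg hlt]
    simp [pvCharValue_z]
termination_by ((cs.length : Int) - (i + 1)).toNat
decreasing_by omega

-- ===== VERDICT (by name: the statement is the Claim_ definition above) =====
theorem get_z_value_spec : Claim_equal_get_z_value := by
  intro s index _ hpre
  unfold Spec_get_z_value get_z_value get_z_value_alt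
  by_cases hlt : index + 1 < (s.toList.length : Int)
  · have hlo : -(s.toList.length : Int) ≤ index + 1 := by
      have := hpre (by simpa [PySem.Str.len_eq] using hlt)
      simpa [PySem.Str.len_eq] using this
    rw [pvZLoopB_eq s.toList index hlo 26]
    ring_nf
  · rw [pvZLoopB]
    rw [dif_neg (fun h => hlt h.1)]
    rw [if_neg hlt]
    rw [pvZRecA]
    rw [dif_neg hlt]
    simp [pvCharValue_z]
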